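-- pv_equiv track=rewrite | github.com/leaker/leaker.github.io | hexo_to_hugo.py | parser_head_lines
-- ===== SOURCE A (Python) =====
-- HEADER_FLAG = '---\n'
--
-- def parser_head_lines(lines: list[str]) -> list[str]:
--     header_lines = list[str]([])
--     in_header = False
--     for i, line in enumerate(lines):
--         if line == HEADER_FLAG:
--             if not in_header:
--                 in_header = True
--                 continue
--             else:  # header end flag founded
--                 break
--         if in_header:
--             header_lines.append(line)
--     return header_lines
-- ===== SOURCE B (Python) =====
-- HEADER_FLAG = '---\n'
--
-- def parser_head_lines(lines: list[str]) -> list[str]: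
--     try:
--         start = lines.index(HEADER_FLAG)
--     except ValueError:
--         return []
--     try:
--         end = lines.index(HEADER_FLAG, start + 1)
--     except ValueError:
--         end = len(lines)
--     return lines[start + 1:end]
-- ===== Notes on version B (the rewrite author's own statement) =====
-- stated objective: simpler
-- what changed: Replaces the stateful in_header scan-and-append loop by locating both '---\n' markers up front with list.index and returning a single slice lines[start+1:end].
import Mathlib
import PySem

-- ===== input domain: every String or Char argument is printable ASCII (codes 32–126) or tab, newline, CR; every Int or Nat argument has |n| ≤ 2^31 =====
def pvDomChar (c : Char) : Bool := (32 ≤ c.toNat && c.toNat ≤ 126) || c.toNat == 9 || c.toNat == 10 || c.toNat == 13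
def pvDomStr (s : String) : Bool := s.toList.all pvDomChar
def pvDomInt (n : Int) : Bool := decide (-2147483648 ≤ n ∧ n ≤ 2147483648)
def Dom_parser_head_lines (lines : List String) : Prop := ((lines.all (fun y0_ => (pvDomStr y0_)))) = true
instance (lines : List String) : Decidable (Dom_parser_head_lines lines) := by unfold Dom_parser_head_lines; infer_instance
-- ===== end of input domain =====

-- B replaces A's stateful in_header scan by locating both '---\n' markers with list.index and slicing once (objective: simpler).


-- ===== PORT A =====
-- the loop over (i, line) with state (in_header, header_lines); break = return acc
def parserHeadGoA : List String → Bool → List String → List String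
  | [], _, acc => acc
  | l :: ls, inH, acc =>
    if l = "---\n" then
      if inH = false then parserHeadGoA ls true acc
      else acc
    else
      if inH = true then parserHeadGoA ls inH (acc ++ [l])
      else parserHeadGoA ls inH acc

def parser_head_lines (lines : List String) : List String :=
  parserHeadGoA lines false []

-- ===== PORT B =====
-- lines.index(HEADER_FLAG, start+1) is ported as index? on lines.drop (start+1) plus the offset (exact: same first match from position start+1)
def parser_head_lines_alt (lines : List String) : List String :=
  match PySem.List.index? lines "---\n" with
  | none => []
  | some start =>
    let stop : Int :=
      match PySem.List.index? (lines.drop (start + 1)) "---\n" with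
      | none => (lines.length : Int)
      | some j => (start : Int) + 1 + (j : Int)
    PySem.List.slice lines (some ((start : Int) + 1)) (some stop)

-- ===== PRECONDITION & SPEC =====
def Spec_parser_head_lines (lines : List String) (out : List String) : Prop := out = parser_head_lines_alt lines
instance (lines : List String) (out : List String) : Decidable (Spec_parser_head_lines lines out) := by unfold Spec_parser_head_lines; infer_instance

-- ===== CLAIM (what is proved, stated in full; the proofs are below) =====
def Claim_equal_parser_head_lines : Prop := ∀ (lines : List String), Dom_parser_head_lines lines → Spec_parser_head_lines lines (parser_head_lines lines)

-- ===== LEMMAS AND PROOFS =====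

-- A's loop once in_header: collects everything up to the next marker
theorem parserHeadGoA_true (ls : List String) (acc : List String) :
    parserHeadGoA ls true acc = acc ++ ls.takeWhile (· ≠ "---\n") := by
  induction ls generalizing acc with
  | nil => simp [parserHeadGoA]
  | cons l ls ih =>
    by_cases h : l = "---\n"
    · simp [parserHeadGoA, h, List.takeWhile]
    · simp [parserHeadGoA, h, List.takeWhile, ih]

-- A's loop before any marker: skips a prefix with no marker
theorem parserHeadGoA_false_skip (pre suf : List String) (acc : List String)
    (h : "---\n" ∉ pre) :
    parserHeadGoA (pre ++ "---\n" :: suf) false acc = parserHeadGoA suf true acc := by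
  induction pre with
  | nil => simp [parserHeadGoA]
  | cons p pre ih =>
    have hp : p ≠ "---\n" := fun he => h (he ▸ List.mem_cons_self)
    simp only [List.cons_append, parserHeadGoA, if_neg hp]
    simpa using ih (fun hm => h (List.mem_cons_of_mem _ hm))

-- A's loop with no marker at all: returns acc
theorem parserHeadGoA_false_none (ls : List String) (acc : List String)
    (h : "---\n" ∉ ls) : parserHeadGoA ls false acc = acc := by
  induction ls with
  | nil => simp [parserHeadGoA]
  | cons l ls ih =>
    have hl : l ≠ "---\n" := fun he => h (he ▸ List.mem_cons_self)
    simp only [parserHeadGoA, if_neg hl]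
    exact ih (fun hm => h (List.mem_cons_of_mem _ hm))

theorem takeWhile_no_marker (ls : List String) (h : "---\n" ∉ ls) :
    ls.takeWhile (· ≠ "---\n") = ls := by
  induction ls with
  | nil => simp
  | cons l ls ih =>
    have hl : l ≠ "---\n" := fun he => h (he ▸ List.mem_cons_self)
    rw [List.takeWhile_cons_of_pos (by simpa using hl)]
    rw [ih (fun hm => h (List.mem_cons_of_mem _ hm))]

theorem takeWhile_marker (pre suf : List String) (h : "---\n" ∉ pre) :
    (pre ++ "---\n" :: suf).takeWhile (· ≠ "---\n") = pre := by
  induction pre with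
  | nil => simp
  | cons p pre ih =>
    have hp : p ≠ "---\n" := fun he => h (he ▸ List.mem_cons_self)
    rw [List.cons_append, List.takeWhile_cons_of_pos (by simpa using hp)]
    rw [ih (fun hm => h (List.mem_cons_of_mem _ hm))]

theorem drop_marker (pre suf : List String) :
    (pre ++ "---\n" :: suf).drop (pre.length + 1) = suf := by
  have : pre ++ "---\n" :: suf = (pre ++ ["---\n"]) ++ suf := by simp
  rw [this]
  have hl : pre.length + 1 = (pre ++ ["---\n"]).length := by simp
  rw [hl, List.drop_left]

-- ===== VERDICT (by name: the statement is the Claim_ definition above) =====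
theorem parser_head_lines_spec : Claim_equal_parser_head_lines := by
  intro lines _
  unfold Spec_parser_head_lines parser_head_lines parser_head_lines_alt
  cases hfind : PySem.List.index? lines "---\n" with
  | none =>
    have hnm : "---\n" ∉ lines := (PySem.List.index?_eq_none_iff _ _).mp hfind
    rw [parserHeadGoA_false_none lines [] hnm]
  | some start =>
    obtain ⟨pre, suf, hsplit, hlen, hpre⟩ := (PySem.List.index?_eq_some_iff _ _ _).mp hfind
    subst hsplit hlen
    rw [parserHeadGoA_false_skip pre suf [] hpre, parserHeadGoA_true, List.nil_append]
    dsimp only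
    rw [drop_marker]
    have hcast : ((pre.length : Int) + 1) = ((pre.length + 1 : Nat) : Int) := by push_cast; ring
    cases hfind2 : PySem.List.index? suf "---\n" with
    | none =>
      have hnm : "---\n" ∉ suf := (PySem.List.index?_eq_none_iff _ _).mp hfind2
      rw [takeWhile_no_marker suf hnm]
      dsimp only
      rw [hcast, show ((pre ++ "---\n" :: suf).length : Int) = (((pre ++ "---\n" :: suf).length : Nat) : Int) from rfl,
        PySem.List.slice_natCast, drop_marker]
      have hl : (pre ++ "---\n" :: suf).length - (pre.length + 1) = suf.length := by
        simp; omega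
      rw [hl, List.take_length]
    | some j =>
      obtain ⟨p2, s2, hsplit2, hlen2, hp2⟩ := (PySem.List.index?_eq_some_iff _ _ _).mp hfind2
      subst hsplit2 hlen2
      rw [takeWhile_marker p2 s2 hp2]
      dsimp only
      have hcast2 : (((pre.length + 1 : Nat) : Int) + (p2.length : Int)) = ((pre.length + 1 + p2.length : Nat) : Int) := by push_cast; ring
      rw [hcast, hcast2, PySem.List.slice_natCast, drop_marker]
      have hl : pre.length + 1 + p2.length - (pre.length + 1) = p2.length := by omega
      rw [hl]
      simp
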